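-- pv_equiv track=rewrite | github.com/MathisNIV/GroovieLive | IA/recommendationService/recommendationService/util.py | lookup_category
-- ===== SOURCE A (Python) =====
-- def lookup_category(genre):
--     categories = {
--         "house": ["afro-house", "bass-club", "bass-house", "deep-house", "funky-house", "house", "jackin-house",
--                   "melodic-house-techno", "organic-house-downtempo", "progressive-house", "tech-house"],
--         "techno": ["techno-peak-time-driving", "techno-raw-deep-hypnotic", "hard-techno"],
--         "trance": ["trance-main-floor", "trance-raw-deep-hypnotic", "psy-trance"],
--         "dubstep": ["140-deep-dubstep-grime", "drum-bass", "dubstep"],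
--         "edm": ["electro-classic-detroit-modern", "mainstage"],
--         "dance": ["dance-electro-pop", "indie-dance", "hardcore"]}
--
--     for category, subgenres in categories.items():
--         if genre in subgenres:
--             return category
--
--     return None
-- ===== SOURCE B (Python) =====
-- # One flat reverse table built once at module load: sub-genre -> parent category.
-- _GENRE_TO_CATEGORY = {
--     "afro-house": "house",
--     "bass-club": "house",
--     "bass-house": "house",
--     "deep-house": "house",
--     "funky-house": "house",
--     "house": "house",
--     "jackin-house": "house",
--     "melodic-house-techno": "house",
--     "organic-house-downtempo": "house",
--     "progressive-house": "house",
--     "tech-house": "house",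
--     "techno-peak-time-driving": "techno",
--     "techno-raw-deep-hypnotic": "techno",
--     "hard-techno": "techno",
--     "trance-main-floor": "trance",
--     "trance-raw-deep-hypnotic": "trance",
--     "psy-trance": "trance",
--     "140-deep-dubstep-grime": "dubstep",
--     "drum-bass": "dubstep",
--     "dubstep": "dubstep",
--     "electro-classic-detroit-modern": "edm",
--     "mainstage": "edm",
--     "dance-electro-pop": "dance",
--     "indie-dance": "dance",
--     "hardcore": "dance",
-- }
--
-- def lookup_category(genre):
--     return _GENRE_TO_CATEGORY.get(genre)
-- ===== Notes on version B (the rewrite author's own statement) =====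
-- stated objective: idiomatic
-- what changed: Replaces A's per-call loop over category lists with an inner membership test by a single flat module-level reverse dictionary (sub-genre -> category) and one direct .get lookup.
import Mathlib
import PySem

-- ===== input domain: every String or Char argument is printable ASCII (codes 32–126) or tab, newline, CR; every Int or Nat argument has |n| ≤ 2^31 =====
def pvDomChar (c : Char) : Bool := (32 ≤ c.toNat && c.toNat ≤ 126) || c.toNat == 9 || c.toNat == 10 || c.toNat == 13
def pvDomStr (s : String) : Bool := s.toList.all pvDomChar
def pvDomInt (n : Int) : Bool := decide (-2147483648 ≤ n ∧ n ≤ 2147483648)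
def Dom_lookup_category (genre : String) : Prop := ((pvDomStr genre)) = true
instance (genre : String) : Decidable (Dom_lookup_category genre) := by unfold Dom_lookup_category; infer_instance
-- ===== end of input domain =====

-- B replaces A's per-call scan over category lists by one flat literal reverse dictionary and a single lookup (idiomatic).

-- ===== PORT A =====
-- the nested dict literal of A
def lcCategories : List (String × List String) :=
  [ ("house", ["afro-house", "bass-club", "bass-house", "deep-house", "funky-house", "house", "jackin-house",
               "melodic-house-techno", "organic-house-downtempo", "progressive-house", "tech-house"]),
    ("techno", ["techno-peak-time-driving", "techno-raw-deep-hypnotic", "hard-techno"]),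
    ("trance", ["trance-main-floor", "trance-raw-deep-hypnotic", "psy-trance"]),
    ("dubstep", ["140-deep-dubstep-grime", "drum-bass", "dubstep"]),
    ("edm", ["electro-classic-detroit-modern", "mainstage"]),
    ("dance", ["dance-electro-pop", "indie-dance", "hardcore"]) ]

-- the 'for category, subgenres in categories.items(): if genre in subgenres: return category' loop
def lcGo (genre : String) : List (String × List String) → Option String
  | [] => none
  | (category, subgenres) :: rest =>
      if subgenres.contains genre then some category else lcGo genre rest

def lookup_category (genre : String) : Option String :=
  lcGo genre lcCategories

-- ===== PORT B =====
-- B's flat module-level literal dict _GENRE_TO_CATEGORY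
def lcTable : PySem.Dict String String := PySem.Dict.mk
  [ ("afro-house", "house"),
    ("bass-club", "house"),
    ("bass-house", "house"),
    ("deep-house", "house"),
    ("funky-house", "house"),
    ("house", "house"),
    ("jackin-house", "house"),
    ("melodic-house-techno", "house"),
    ("organic-house-downtempo", "house"),
    ("progressive-house", "house"),
    ("tech-house", "house"),
    ("techno-peak-time-driving", "techno"),
    ("techno-raw-deep-hypnotic", "techno"),
    ("hard-techno", "techno"),
    ("trance-main-floor", "trance"),
    ("trance-raw-deep-hypnotic", "trance"),
    ("psy-trance", "trance"),
    ("140-deep-dubstep-grime", "dubstep"),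
    ("drum-bass", "dubstep"),
    ("dubstep", "dubstep"),
    ("electro-classic-detroit-modern", "edm"),
    ("mainstage", "edm"),
    ("dance-electro-pop", "dance"),
    ("indie-dance", "dance"),
    ("hardcore", "dance") ]

def lookup_category_alt (genre : String) : Option String :=
  PySem.Dict.get? lcTable genre

-- ===== PRECONDITION & SPEC =====
def Spec_lookup_category (genre : String) (out : Option String) : Prop := out = lookup_category_alt genre
instance (genre : String) (out : Option String) : Decidable (Spec_lookup_category genre out) := by unfold Spec_lookup_category; infer_instance

-- ===== CLAIM =====
def Claim_equal_lookup_category : Prop := ∀ (genre : String), Dom_lookup_category genre → Spec_lookup_category genre (lookup_category genre)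

-- ===== LEMMAS AND PROOFS =====

-- the flattened (sub-genre, category) pairs of A's nested table
def lcPairs (l : List (String × List String)) : List (String × String) :=
  l.flatMap fun p => p.2.map fun s => (s, p.1)

theorem lcGet?_map_append (g c : String) (subs : List String) (t : List (String × String)) :
    (PySem.Dict.mk ((subs.map fun s => (s, c)) ++ t)).get? g
      = if subs.contains g then some c else (PySem.Dict.mk t).get? g := by
  induction subs with
  | nil => simp
  | cons s ss ih =>
    by_cases h : g = s
    · simp [PySem.Dict.get?_mk_cons, h]
    · simp [PySem.Dict.get?_mk_cons, h, ih, Ne.symm h]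

theorem lcGo_eq_lookup (g : String) (l : List (String × List String)) :
    lcGo g l = (PySem.Dict.mk (lcPairs l)).get? g := by
  induction l with
  | nil => simp [lcGo, lcPairs, PySem.Dict.get?]
  | cons p rest ih =>
    obtain ⟨c, subs⟩ := p
    simp only [lcGo, lcPairs, List.flatMap_cons, lcGet?_map_append]
    rw [ih]
    rfl

-- B's flat literal table is exactly the flattening of A's nested table
theorem lcTable_eq : lcTable = PySem.Dict.mk (lcPairs lcCategories) := by decide

-- ===== VERDICT =====
theorem lookup_category_spec : Claim_equal_lookup_category := by
  intro g _
  show lookup_category g = lookup_category_alt g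
  simp only [lookup_category, lookup_category_alt, lcTable_eq, lcGo_eq_lookup]
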